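-- pv_equiv track=rewrite | github.com/bgrove1974/myblog | PokerHand.py | in_a_row
-- ===== SOURCE A (Python) =====
-- def in_a_row(ranks, n=5):
--     """
--     Checks whether the histogram has n ranks in a row.
--     hist: map from rank to frequency
--     n: number we need to get to
--     """
--     count = 0
--     for i in range(1, 15):
--         if ranks.get(i, 0):
--             count += 1
--             if count == n:
--                 return True
--         else:
--             count = 0
--     return False
-- ===== SOURCE B (Python) =====
-- def in_a_row(ranks, n=5):
--     """Sliding-window search: try every window of n consecutive ranks in 1..14."""
--     if n <= 0:
--         return False
--     for start in range(1, 16 - n):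
--         if all(ranks.get(j, 0) for j in range(start, start + n)):
--             return True
--     return False
-- ===== Notes on version B (the rewrite author's own statement) =====
-- stated objective: alternative
-- what changed: Replaces A's single running-counter pass over ranks 1..14 with a nested sliding-window search that tests each candidate start for a fully-present window of n consecutive ranks.
import Mathlib
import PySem

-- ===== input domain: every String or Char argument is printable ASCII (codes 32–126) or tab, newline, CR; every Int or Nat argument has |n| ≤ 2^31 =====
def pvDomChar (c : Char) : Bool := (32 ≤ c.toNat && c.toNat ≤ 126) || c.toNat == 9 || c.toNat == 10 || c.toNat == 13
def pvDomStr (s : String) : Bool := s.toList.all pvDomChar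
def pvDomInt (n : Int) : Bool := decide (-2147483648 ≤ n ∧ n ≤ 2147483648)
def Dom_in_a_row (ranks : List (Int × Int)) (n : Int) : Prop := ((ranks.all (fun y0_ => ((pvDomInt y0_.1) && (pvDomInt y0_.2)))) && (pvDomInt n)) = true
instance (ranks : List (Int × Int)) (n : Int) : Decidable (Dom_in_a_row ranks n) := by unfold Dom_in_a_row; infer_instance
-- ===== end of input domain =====

-- B replaces A's single running-counter pass over ranks 1..14 with a nested
-- sliding-window search over every candidate start (alternative decomposition, not faster).

-- ===== PORT A =====
-- the for-loop of A with early return: list of remaining i's, current count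
def inRowLoop (ranks : List (Int × Int)) (n : Int) : List Int → Int → Bool
  | [], _ => false
  | i :: rest, count =>
    if PySem.Dict.getD (PySem.Dict.mk ranks) i 0 ≠ 0 then
      (if count + 1 = n then true else inRowLoop ranks n rest (count + 1))
    else inRowLoop ranks n rest 0

def in_a_row (ranks : List (Int × Int)) (n : Int) : Bool :=
  inRowLoop ranks n (PySem.List.pyRange 1 15 1) 0

-- ===== PORT B =====
def in_a_row_alt (ranks : List (Int × Int)) (n : Int) : Bool :=
  if n ≤ 0 then false
  else
    (PySem.List.pyRange 1 (16 - n) 1).any (fun start =>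
      (PySem.List.pyRange start (start + n) 1).all
        (fun j => PySem.Dict.getD (PySem.Dict.mk ranks) j 0 != 0))

-- ===== PRECONDITION & SPEC =====
def Spec_in_a_row (ranks : List (Int × Int)) (n : Int) (out : Bool) : Prop := out = in_a_row_alt ranks n
instance (ranks : List (Int × Int)) (n : Int) (out : Bool) : Decidable (Spec_in_a_row ranks n out) := by unfold Spec_in_a_row; infer_instance

-- ===== CLAIM (what is proved, stated in full; the proofs are below) =====
def Claim_equal_in_a_row : Prop := ∀ (ranks : List (Int × Int)) (n : Int), Dom_in_a_row ranks n → Spec_in_a_row ranks n (in_a_row ranks n)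

-- ===== LEMMAS AND PROOFS =====

-- A's loop over the booleans only
def scanL (n : Int) : List Bool → Int → Bool
  | [], _ => false
  | b :: rest, c => if b then (if c + 1 = n then true else scanL n rest (c + 1)) else scanL n rest 0

-- "the first m entries exist and are all true"
def takeAllB (m : Nat) (xs : List Bool) : Bool := decide (m ≤ xs.length) && (xs.take m).all id

-- "some window of m consecutive entries is all true" (sliding window on a boolean list)
def winB (m : Nat) : List Bool → Bool
  | [] => false
  | b :: rest => takeAllB m (b :: rest) || winB m rest

theorem loop_eq_scan (ranks : List (Int × Int)) (n : Int) (js : List Int) (c : Int) :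
    inRowLoop ranks n js c
      = scanL n (js.map (fun i => PySem.Dict.getD (PySem.Dict.mk ranks) i 0 != 0)) c := by
  induction js generalizing c with
  | nil => rfl
  | cons i rest ih =>
    simp only [inRowLoop, List.map_cons, scanL, bne_iff_ne]
    by_cases h : PySem.Dict.getD (PySem.Dict.mk ranks) i 0 ≠ 0 <;> simp [h, ih]

theorem scan_nonpos (n : Int) (hn : n ≤ 0) (bs : List Bool) (c : Int) (hc : 0 ≤ c) :
    scanL n bs c = false := by
  induction bs generalizing c with
  | nil => rfl
  | cons b rest ih =>
    simp only [scanL]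
    have h1 : ¬ (c + 1 = n) := by omega
    by_cases hb : b = true
    · simp only [hb, if_neg h1, if_pos trivial]
      exact ih (c + 1) (by omega)
    · simp only [Bool.not_eq_true] at hb
      rw [hb, if_neg Bool.false_ne_true]
      exact ih 0 (by omega)

theorem scan_big (n : Int) (bs : List Bool) (c : Int) (hc : 0 ≤ c) (h : c + bs.length < n) :
    scanL n bs c = false := by
  induction bs generalizing c with
  | nil => rfl
  | cons b rest ih =>
    simp only [scanL]
    simp only [List.length_cons] at h
    have h1 : ¬ (c + 1 = n) := by omega
    by_cases hb : b = true
    · simp only [hb, if_neg h1, if_pos trivial]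
      exact ih (c + 1) (by omega) (by omega)
    · simp only [Bool.not_eq_true] at hb
      rw [hb, if_neg Bool.false_ne_true]
      exact ih 0 (by omega) (by push_cast at h ⊢; omega)

theorem takeAllB_mono (j k : Nat) (hjk : j ≤ k) (xs : List Bool) (h : takeAllB k xs = true) :
    takeAllB j xs = true := by
  simp only [takeAllB, Bool.and_eq_true, decide_eq_true_eq, List.all_eq_true] at h ⊢
  refine ⟨le_trans hjk h.1, fun x hx => h.2 x ?_⟩
  have : xs.take j = (xs.take k).take j := by rw [List.take_take, Nat.min_eq_left hjk]
  rw [this] at hx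
  exact List.mem_of_mem_take hx

theorem bool_absorb (X Y W : Bool) (h : Y = true → X = true) : (X || (Y || W)) = (X || W) := by
  cases X <;> cases Y <;> simp_all

theorem winB_absorb (m : Nat) (hm : 1 ≤ m) (xs : List Bool) :
    (takeAllB m xs || winB m xs) = winB m xs := by
  cases xs with
  | nil => simp [takeAllB, winB]; omega
  | cons b rest => simp [winB]

theorem takeAllB_succ_cons (j : Nat) (b : Bool) (rest : List Bool) :
    takeAllB (j + 1) (b :: rest) = (b && takeAllB j rest) := by
  simp [takeAllB, Bool.and_left_comm]

theorem scan_eq_win (n : Int) (m : Nat) (hm : n = (m : Int)) (bs : List Bool) (c : Int)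
    (hc0 : 0 ≤ c) (hcm : c < n) :
    scanL n bs c = (takeAllB (m - c.toNat) bs || winB m bs) := by
  induction bs generalizing c with
  | nil =>
    simp only [scanL, winB, takeAllB]
    simp; omega
  | cons b rest ih =>
    obtain ⟨m', rfl⟩ : ∃ m', m = m' + 1 := ⟨m - 1, by omega⟩
    have hsub : m' + 1 - c.toNat = (m' + 1 - c.toNat - 1) + 1 := by omega
    simp only [scanL, winB]
    by_cases hb : b = true
    · subst hb
      by_cases hcn : c + 1 = n
      · have h2 : m' + 1 - c.toNat = 1 := by omega
        simp [h2, takeAllB, hcn]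
      · rw [if_pos rfl, if_neg hcn, ih (c + 1) (by omega) (by omega)]
        have h1 : m' + 1 - (c + 1).toNat = m' + 1 - c.toNat - 1 := by omega
        rw [h1, hsub, takeAllB_succ_cons, takeAllB_succ_cons]
        simp only [Bool.true_and]
        exact (bool_absorb _ _ _ (takeAllB_mono _ m' (by omega) rest)).symm
    · simp only [Bool.not_eq_true] at hb
      subst hb
      rw [if_neg (by simp), ih 0 le_rfl (by omega)]
      simp only [Int.toNat_zero, Nat.sub_zero]
      rw [hsub, takeAllB_succ_cons, takeAllB_succ_cons]
      simp only [Bool.false_and, Bool.false_or]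
      exact winB_absorb (m' + 1) (by omega) rest

theorem winB_short (m : Nat) (xs : List Bool) (h : xs.length < m) : winB m xs = false := by
  induction xs with
  | nil => rfl
  | cons b rest ih =>
    simp only [List.length_cons] at h
    simp only [winB, Bool.or_eq_false_iff]
    refine ⟨?_, ih (by omega)⟩
    simp [takeAllB]
    omega

theorem b_side (p : Int → Bool) (n : Int) (m : Nat) (hm : n = (m : Int)) (h1 : 1 ≤ n) :
    ∀ (k : Nat) (a b : Int), (b - a).toNat = k →
    (PySem.List.pyRange a (b - n + 1) 1).any (fun s => (PySem.List.pyRange s (s + n) 1).all p)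
      = winB m ((PySem.List.pyRange a b 1).map p) := by
  intro k
  induction k with
  | zero =>
    intro a b hk
    have hba : b ≤ a := by omega
    rw [PySem.List.pyRange_one_eq_nil hba, PySem.List.pyRange_one_eq_nil (by omega)]
    rfl
  | succ k ih =>
    intro a b hk
    have hab : a < b := by omega
    rw [PySem.List.pyRange_one_cons hab, List.map_cons]
    by_cases hwin : a + n ≤ b
    · have hsplit : PySem.List.pyRange a b 1
          = PySem.List.pyRange a (a + n) 1 ++ PySem.List.pyRange (a + n) b 1 :=
        PySem.List.pyRange_one_append a (a + n) b (by omega) hwin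
      have hlen : (PySem.List.pyRange a (a + n) 1).length = m := by
        rw [PySem.List.length_pyRange_one]; omega
      have hwb : winB m (p a :: (PySem.List.pyRange (a + 1) b 1).map p)
          = (takeAllB m ((PySem.List.pyRange a b 1).map p)
              || winB m ((PySem.List.pyRange (a + 1) b 1).map p)) := by
        rw [winB, PySem.List.pyRange_one_cons hab, List.map_cons]
      have htake : takeAllB m ((PySem.List.pyRange a b 1).map p)
          = (PySem.List.pyRange a (a + n) 1).all p := by
        rw [hsplit, List.map_append]
        have hlenm : ((PySem.List.pyRange a (a + n) 1).map p).length = m := by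
          simp [hlen]
        have hge : m ≤ (((PySem.List.pyRange a (a + n) 1).map p)
            ++ ((PySem.List.pyRange (a + n) b 1).map p)).length := by
          simp only [List.length_append]; omega
        simp only [takeAllB, hge, decide_true, Bool.true_and]
        rw [List.take_append_of_le_length (by omega), List.take_of_length_le (by omega)]
        simp [List.all_map]
      rw [PySem.List.pyRange_one_cons (show a < b - n + 1 by omega)]
      simp only [List.any_cons]
      rw [ih (a + 1) b (by omega), hwb, htake]
    · have houter : PySem.List.pyRange a (b - n + 1) 1 = [] :=
        PySem.List.pyRange_one_eq_nil (by omega)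
      rw [houter]
      have h2 : winB m (p a :: (PySem.List.pyRange (a + 1) b 1).map p) = false := by
        apply winB_short
        simp only [List.length_cons, List.length_map, PySem.List.length_pyRange_one]
        omega
      rw [h2]
      rfl

theorem in_a_row_eq (ranks : List (Int × Int)) (n : Int) :
    in_a_row ranks n = in_a_row_alt ranks n := by
  rw [in_a_row, in_a_row_alt, loop_eq_scan]
  by_cases h0 : n ≤ 0
  · rw [scan_nonpos n h0 _ 0 le_rfl, if_pos h0]
  · rw [if_neg h0]
    by_cases h15 : 15 ≤ n
    · rw [scan_big n _ 0 le_rfl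
        (by simp [PySem.List.length_pyRange_one]; omega)]
      rw [PySem.List.pyRange_one_eq_nil (by omega : 16 - n ≤ 1)]
      rfl
    · have h1 : 1 ≤ n := by omega
      rw [scan_eq_win n n.toNat (by omega) _ 0 le_rfl (by omega)]
      simp only [Int.toNat_zero, Nat.sub_zero]
      rw [winB_absorb n.toNat (by omega)]
      rw [← b_side (fun i => PySem.Dict.getD (PySem.Dict.mk ranks) i 0 != 0) n n.toNat
            (by omega) h1 ((15 : Int) - 1).toNat 1 15 rfl]
      rw [show (15 : Int) - n + 1 = 16 - n by ring]

-- ===== VERDICT (by name: the statement is the Claim_ definition above) =====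
theorem in_a_row_spec : Claim_equal_in_a_row := by
  intro ranks n _
  unfold Spec_in_a_row
  exact in_a_row_eq ranks n
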